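-- pv_equiv track=rewrite | github.com/tomaslibson/Algo-1-python | parcial1.py | contar_traducciones_iguales
-- ===== SOURCE A (Python) =====
-- def contar_traducciones_iguales(ing: dict[(str,str)], ale: dict[str,str]) -> int:
--     keysingles = list(ing.keys())
--     keysaleman = list(ale.keys())
--
--     res = 0
--     i = 0
--
--     while i < len(keysingles):
--         w = keysingles[i]
--         for k in keysaleman:
--             if k == w and ing[w] == ale[k]:
--                 res+=1
--
--         i+=1
--     return res
-- ===== SOURCE B (Python) =====
-- def contar_traducciones_iguales(ing: dict, ale: dict) -> int:
--     # Hashed set intersection of (key, value) items; dict keys are unique,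
--     # so the size equals the number of shared keys with equal values.
--     return len(set(ing.items()) & set(ale.items()))
-- ===== Notes on version B (the rewrite author's own statement) =====
-- stated objective: idiomatic
-- what changed: Replaces the index-driven nested key scans with a single hashed set intersection of the two dicts' item pairs, returning its size.
import Mathlib
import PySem

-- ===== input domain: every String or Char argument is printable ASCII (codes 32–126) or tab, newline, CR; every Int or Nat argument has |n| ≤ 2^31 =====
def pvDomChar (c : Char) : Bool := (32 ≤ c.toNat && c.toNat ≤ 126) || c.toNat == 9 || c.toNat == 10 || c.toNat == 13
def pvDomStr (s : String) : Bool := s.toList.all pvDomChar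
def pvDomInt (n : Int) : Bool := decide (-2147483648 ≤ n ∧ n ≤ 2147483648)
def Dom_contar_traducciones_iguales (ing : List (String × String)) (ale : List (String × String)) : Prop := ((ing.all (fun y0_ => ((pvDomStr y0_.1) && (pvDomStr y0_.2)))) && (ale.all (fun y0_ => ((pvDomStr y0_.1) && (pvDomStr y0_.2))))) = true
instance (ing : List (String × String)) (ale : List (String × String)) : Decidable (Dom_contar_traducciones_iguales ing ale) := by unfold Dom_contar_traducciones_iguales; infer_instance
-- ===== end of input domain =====

-- B replaces A's nested key scans with one set intersection of item pairs (idiomatic).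

-- ===== PORT A =====
def contar_traducciones_iguales (ing : List (String × String)) (ale : List (String × String)) : Int :=
  let dIng := PySem.Dict.mk ing
  let dAle := PySem.Dict.mk ale
  let keysingles := dIng.keys
  let keysaleman := dAle.keys
  keysingles.foldl (fun res w =>
    keysaleman.foldl (fun res k =>
      if k == w && (dIng.get? w == dAle.get? k) then res + 1 else res) res) 0

-- ===== PORT B =====
def contar_traducciones_iguales_alt (ing : List (String × String)) (ale : List (String × String)) : Int :=
  PySem.Set.len (PySem.Set.inter
    (PySem.Set.ofList (PySem.Dict.mk ing).items)
    (PySem.Set.ofList (PySem.Dict.mk ale).items))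

-- ===== PRECONDITION & SPEC =====
-- Pre_ excludes association lists with duplicate keys: those do not represent a Python dict
-- (a Python dict's keys are unique), so neither program is ever called on them.
def Pre_contar_traducciones_iguales (ing : List (String × String)) (ale : List (String × String)) : Prop :=
  (ing.map Prod.fst).Nodup ∧ (ale.map Prod.fst).Nodup
instance (ing : List (String × String)) (ale : List (String × String)) : Decidable (Pre_contar_traducciones_iguales ing ale) := by unfold Pre_contar_traducciones_iguales; infer_instance

def pvWitness_contar_traducciones_iguales : (List (String × String)) × (List (String × String)) :=
  ([("casa", "house"), ("perro", "dog")], [("casa", "house"), ("gato", "cat")])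

def Spec_contar_traducciones_iguales (ing : List (String × String)) (ale : List (String × String)) (out : Int) : Prop := out = contar_traducciones_iguales_alt ing ale
instance (ing : List (String × String)) (ale : List (String × String)) (out : Int) : Decidable (Spec_contar_traducciones_iguales ing ale out) := by unfold Spec_contar_traducciones_iguales; infer_instance

-- ===== CLAIM (what is proved, stated in full; the proofs are below) =====
def Claim_equal_contar_traducciones_iguales : Prop := ∀ (ing : List (String × String)) (ale : List (String × String)), Dom_contar_traducciones_iguales ing ale → Pre_contar_traducciones_iguales ing ale → Spec_contar_traducciones_iguales ing ale (contar_traducciones_iguales ing ale)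

-- ===== LEMMAS AND PROOFS =====

-- count over a Nodup key list of a predicate that fires only at the key w
lemma countP_keyed (l : List String) (w : String) (f : String → Bool) (h : l.Nodup) :
    l.countP (fun k => k == w && f k) = if w ∈ l ∧ f w then 1 else 0 := by
  induction l with
  | nil => simp
  | cons a l ih =>
    rcases List.nodup_cons.mp h with ⟨ha, hl⟩
    by_cases haw : a = w
    · subst haw
      by_cases hf : f a <;> simp [ha, ih hl, hf]
    · simp [Ne.symm haw, ih hl, haw]

-- A's inner pass over one ing item counts 1 exactly when that item is in ale
lemma inner_count (ing ale : List (String × String)) (p : String × String)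
    (hp : p ∈ ing) (hing : (ing.map Prod.fst).Nodup) (hale : (ale.map Prod.fst).Nodup) :
    (ale.map Prod.fst).countP
      (fun k => k == p.1 && ((PySem.Dict.mk ing).get? p.1 == (PySem.Dict.mk ale).get? k))
      = if p ∈ ale then 1 else 0 := by
  rw [countP_keyed _ _ _ hale]
  have hg : (PySem.Dict.mk ing).get? p.1 = some p.2 :=
    PySem.Dict.get?_of_mem_items (d := PySem.Dict.mk ing) hp hing
  have hiff : ((PySem.Dict.mk ale).get? p.1 = some p.2) ↔ p ∈ ale := by
    have := PySem.Dict.get?_eq_some_iff_mem_items (d := PySem.Dict.mk ale)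
      (k := p.1) (v := p.2) hale
    simpa using this
  by_cases hmem : p ∈ ale
  · have hk : p.1 ∈ ale.map Prod.fst := List.mem_map_of_mem hmem
    simp [hk, hg, hiff.mpr hmem, hmem]
  · rcases h2 : (PySem.Dict.mk ale).get? p.1 with _ | v
    · simp [hg, hmem]
    · have hne : v ≠ p.2 := by
        intro hv; exact hmem (hiff.mp (hv ▸ h2))
      simp [hg, hmem, Ne.symm hne]

-- ===== VERDICT (by name: the statement is the Claim_ definition above) =====
theorem contar_traducciones_iguales_spec : Claim_equal_contar_traducciones_iguales := by
  intro ing ale _ hpre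
  rcases hpre with ⟨hing, hale⟩
  unfold Spec_contar_traducciones_iguales contar_traducciones_iguales contar_traducciones_iguales_alt
  -- B side: items are Nodup, so set-building is the identity and intersection is a filter
  have hnd : ing.Nodup := hing.of_map
  have hB : PySem.Set.len (PySem.Set.inter
      (PySem.Set.ofList (PySem.Dict.mk ing).items)
      (PySem.Set.ofList (PySem.Dict.mk ale).items))
      = ((ing.countP (fun p => decide (p ∈ ale)) : Nat) : Int) := by
    have h1 : PySem.Set.ofList (PySem.Dict.mk ing).items = ing :=
      PySem.Set.ofList_eq_self_of_nodup ing hnd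
    simp only [PySem.Set.len, PySem.Set.inter, h1]
    rw [← List.countP_eq_length_filter]
    congr 1
    apply List.countP_congr
    intro p _
    simp [PySem.Set.mem_ofList]
  rw [hB]
  -- A side: inner loop is a countP, outer loop a sum of indicators
  have hA : ∀ (init : Int),
      ((PySem.Dict.mk ing).keys).foldl (fun res w =>
        ((PySem.Dict.mk ale).keys).foldl (fun res k =>
          if k == w && ((PySem.Dict.mk ing).get? w == (PySem.Dict.mk ale).get? k)
          then res + 1 else res) res) init
      = init + ((ing.map Prod.fst).map (fun w =>
          (((ale.map Prod.fst).countP (fun k => k == w &&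
            ((PySem.Dict.mk ing).get? w == (PySem.Dict.mk ale).get? k)) : Nat) : Int))).sum := by
    intro init
    have hkeys : (PySem.Dict.mk ing).keys = ing.map Prod.fst := rfl
    have hkeys' : (PySem.Dict.mk ale).keys = ale.map Prod.fst := rfl
    rw [hkeys, hkeys']
    rw [show (fun (res : Int) w =>
        (ale.map Prod.fst).foldl (fun res k =>
          if k == w && ((PySem.Dict.mk ing).get? w == (PySem.Dict.mk ale).get? k)
          then res + 1 else res) res)
      = (fun (res : Int) w => res + (((ale.map Prod.fst).countP (fun k => k == w &&
          ((PySem.Dict.mk ing).get? w == (PySem.Dict.mk ale).get? k)) : Nat) : Int))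
      from funext fun res => funext fun w =>
        PySem.List.foldl_count_if _ _ res]
    exact PySem.List.foldl_add _ _ init
  rw [hA, List.map_map]
  have hmap : (ing.map (fun p => (((ale.map Prod.fst).countP (fun k => k == p.1 &&
        ((PySem.Dict.mk ing).get? p.1 == (PySem.Dict.mk ale).get? k)) : Nat) : Int)))
      = ing.map (fun p => if decide (p ∈ ale) = true then (1 : Int) else 0) := by
    apply List.map_congr_left
    intro p hp
    rw [inner_count ing ale p hp hing hale]
    by_cases hmem : p ∈ ale <;> simp [hmem]
  simp only [Function.comp_def]
  rw [hmap, PySem.List.sum_map_ite_one_zero]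
  omega
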